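-- pv_equiv track=rewrite | github.com/bonasoobin/Practice | 프로그래머스/unrated/181863. rny＿string/rny＿string.py | solution
-- ===== SOURCE A (Python) =====
-- def solution(rny_string):
--     a = list(rny_string)
--     b = ''
--     for i in range(len(a)):
--         if a[i] == 'm':
--             a[i]='rn'
--         b = b+a[i]
--     return b
-- ===== SOURCE B (Python) =====
-- def solution(rny_string):
--     return 'rn'.join(rny_string.split('m'))
-- ===== Notes on version B (the rewrite author's own statement) =====
-- stated objective: idiomatic
-- what changed: Replaces the index loop that mutates a character list and repeatedly concatenates onto an accumulator string with a split-on-separator followed by a join-with-replacement pass.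
import Mathlib
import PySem

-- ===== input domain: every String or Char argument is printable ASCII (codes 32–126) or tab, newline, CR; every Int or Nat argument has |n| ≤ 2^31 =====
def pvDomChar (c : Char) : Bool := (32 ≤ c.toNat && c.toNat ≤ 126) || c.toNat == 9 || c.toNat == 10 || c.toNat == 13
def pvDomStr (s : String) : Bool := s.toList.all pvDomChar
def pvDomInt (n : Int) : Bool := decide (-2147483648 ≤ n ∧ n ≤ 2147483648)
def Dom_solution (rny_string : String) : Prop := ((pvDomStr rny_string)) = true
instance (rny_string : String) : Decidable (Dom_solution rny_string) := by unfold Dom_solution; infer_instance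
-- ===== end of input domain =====

-- B replaces A's index loop (mutating a char list and concatenating into an accumulator) with split('m') + 'rn'.join — idiomatic.

-- ===== PORT A =====
-- A walks the characters, turning 'm' into "rn" and appending each piece to the accumulator b.
def solution (rny_string : String) : String :=
  String.ofList
    (rny_string.toList.foldl
      (fun b c => b ++ (if c = 'm' then ['r', 'n'] else [c])) [])

-- ===== PORT B =====
-- B: 'rn'.join(rny_string.split('m'))
def solution_alt (rny_string : String) : String :=
  PySem.Str.join "rn" ((PySem.Str.split? rny_string "m").getD [])

-- ===== PRECONDITION & SPEC =====
def Spec_solution (rny_string : String) (out : String) : Prop := out = solution_alt rny_string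
instance (rny_string : String) (out : String) : Decidable (Spec_solution rny_string out) := by unfold Spec_solution; infer_instance

-- ===== CLAIM (what is proved, stated in full; the proofs are below) =====
def Claim_equal_solution : Prop := ∀ (rny_string : String), Dom_solution rny_string → Spec_solution rny_string (solution rny_string)

-- ===== LEMMAS AND PROOFS =====

def pvExpand (c : Char) : List Char := if c = 'm' then ['r', 'n'] else [c]

theorem pv_foldl_flatMap (l : List Char) (b : List Char) :
    l.foldl (fun b c => b ++ pvExpand c) b = b ++ l.flatMap pvExpand := by
  induction l generalizing b with
  | nil => simp
  | cons c rest ih => simp [List.foldl, ih, List.append_assoc]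

theorem pv_join_append_singleton (sep : List Char) (xs : List (List Char)) (y : List Char) :
    PySem.Chars.join sep (xs ++ [y]) =
      PySem.Chars.join sep xs ++ (if xs = [] then [] else sep) ++ y := by
  induction xs with
  | nil => simp [PySem.Chars.join, List.intercalate]
  | cons x xs ih =>
    cases xs with
    | nil => simp [PySem.Chars.join, List.intercalate, List.intersperse]
    | cons z zs =>
      simp only [PySem.Chars.join, List.intercalate, List.cons_append,
        List.intersperse, List.flatten] at ih ⊢
      simp [ih, List.append_assoc]

set_option maxRecDepth 8192 in
theorem pv_go_join (fuel : Nat) (l cur acc : List Char) (hacc : List (List Char))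
    (hf : l.length ≤ fuel) :
    PySem.Chars.join ['r','n'] (PySem.Chars.splitOn.go ['m'] fuel l cur hacc) =
      PySem.Chars.join ['r','n'] hacc.reverse ++
        (if hacc = [] then [] else ['r','n']) ++ cur.reverse ++ l.flatMap pvExpand := by
  induction fuel generalizing l cur hacc with
  | zero =>
    have : l = [] := List.length_eq_zero_iff.mp (Nat.le_zero.mp hf)
    subst this
    simp [PySem.Chars.splitOn.go, pv_join_append_singleton]
  | succ f ih =>
    cases l with
    | nil => simp [PySem.Chars.splitOn.go, pv_join_append_singleton]
    | cons c rest =>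
      by_cases hc : c = 'm'
      · subst hc
        have hpre : List.isPrefixOf ['m'] ('m' :: rest) = true := by
          simp [List.isPrefixOf]
        have h1 : rest.length ≤ f := by simpa using hf
        have := ih rest [] (cur.reverse :: hacc) h1
        simp only [PySem.Chars.splitOn.go, hpre, if_true, List.length_cons,
          List.length_nil, List.drop_succ_cons, List.drop_zero]
        rw [this]
        have hsplit2 : (cur.reverse :: hacc).reverse = hacc.reverse ++ [cur.reverse] := by
          simp
        rw [hsplit2, pv_join_append_singleton]
        simp only [List.reverse_eq_nil_iff, List.reverse_nil, List.flatMap_cons, pvExpand,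
          reduceIte, List.append_nil, List.nil_append, List.append_assoc,
          List.cons_ne_nil, if_neg (List.cons_ne_nil _ _)]
      · have hpre : List.isPrefixOf ['m'] (c :: rest) = false := by
          simp only [List.isPrefixOf, List.isPrefixOf_nil_left, Bool.and_true,
            beq_eq_false_iff_ne, ne_eq]
          exact fun h => hc h.symm
        have h1 : rest.length ≤ f := by simpa using hf
        have := ih rest (c :: cur) hacc h1
        simp only [PySem.Chars.splitOn.go, hpre]
        rw [if_neg (by simp), this]
        have hex : pvExpand c = [c] := by simp [pvExpand, hc]
        simp only [List.reverse_cons, List.flatMap_cons, hex, List.append_assoc,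
          List.singleton_append]

theorem pv_join_splitOn (cs : List Char) :
    PySem.Chars.join ['r','n'] (PySem.Chars.splitOn cs ['m']) = cs.flatMap pvExpand := by
  have := pv_go_join (cs.length + 1) cs [] [] [] (Nat.le_succ _)
  simpa [PySem.Chars.splitOn] using this

-- ===== VERDICT (by name: the statement is the Claim_ definition above) =====
theorem solution_spec : Claim_equal_solution := by
  intro s _
  unfold Spec_solution solution solution_alt
  apply String.toList_inj.mp
  have hsplit : PySem.Str.split? s "m" ≠ none := by
    simp [PySem.Str.split?, PySem.Chars.split?]
  obtain ⟨parts, hp⟩ := Option.ne_none_iff_exists'.mp hsplit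
  have hmap : Option.map (fun x => List.map String.toList x) (PySem.Str.split? s "m")
      = PySem.Chars.split? s.toList "m".toList := PySem.Str.split?_map s "m"
  rw [hp] at hmap
  have hchars : parts.map String.toList = PySem.Chars.splitOn s.toList ['m'] := by
    have : PySem.Chars.split? s.toList "m".toList
        = some (PySem.Chars.splitOn s.toList "m".toList) := by
      simp [PySem.Chars.split?]
    rw [this] at hmap
    simpa using Option.some_injective _ hmap
  rw [hp]
  simp only [Option.getD_some]
  rw [PySem.Str.toList_join, hchars]
  have : "rn".toList = ['r','n'] := by decide
  rw [this, pv_join_splitOn]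
  rw [show (fun (b : List Char) (c : Char) => b ++ (if c = 'm' then ['r','n'] else [c]))
        = (fun b c => b ++ pvExpand c) from by funext b c; simp [pvExpand]]
  rw [pv_foldl_flatMap]
  simp
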